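-- pv_equiv track=rewrite | github.com/hadamrd/Hacker-Rank-Problems | CardsPermutation.py | getnP
-- ===== SOURCE A (Python) =====
-- def update(bit, i, v):
--     n = len(bit)
--     while i < n :
--         bit[i]+=v
--         i+=i&(-i)
--
-- def getsum(bit, i):
--     s=0
--     while i>0 :
--         s+=bit[i]
--         i -= i&(-i)
--     return s
--
-- def getnP(P,fixed):
--     n = len(P)
--     m = max(P)
--     nI=[0]
--     for i in range(2,n+1):
--         nI.append(nI[-1] + fixed[i-2] )
--     bit = [0 for i in range(m+1)]
--
--     nP = [0 for i in range(n)]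
--     for i in range(n-1,0,-1):
--         if P[i] > 0 :
--             nP[i] = nI[P[i]-1] - getsum(bit, P[i]-1)
--             update(bit, P[i], 1)
--         else :
--             nP[i] = -1
--
--     return nP
-- ===== SOURCE B (Python) =====
-- def getnP(P, fixed):
--     n = len(P)
--     nI = [0]
--     for i in range(2, n + 1):
--         nI.append(nI[-1] + fixed[i - 2])
--     nP = [0] * n
--     seen = []
--     for i in range(n - 1, 0, -1):
--         if P[i] > 0:
--             nP[i] = nI[P[i] - 1] - sum(1 for v in seen if v < P[i])
--             seen.append(P[i])
--         else:
--             nP[i] = -1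
--     return nP
-- ===== Notes on version B (the rewrite author's own statement) =====
-- stated objective: simpler
-- what changed: Replaced the Fenwick tree (bit array with i&-i update/getsum loops) by a plain list of already-counted values and a direct 'how many seen values are < P[i]' scan; the prefix-offset array nI is kept.
import Mathlib
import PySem

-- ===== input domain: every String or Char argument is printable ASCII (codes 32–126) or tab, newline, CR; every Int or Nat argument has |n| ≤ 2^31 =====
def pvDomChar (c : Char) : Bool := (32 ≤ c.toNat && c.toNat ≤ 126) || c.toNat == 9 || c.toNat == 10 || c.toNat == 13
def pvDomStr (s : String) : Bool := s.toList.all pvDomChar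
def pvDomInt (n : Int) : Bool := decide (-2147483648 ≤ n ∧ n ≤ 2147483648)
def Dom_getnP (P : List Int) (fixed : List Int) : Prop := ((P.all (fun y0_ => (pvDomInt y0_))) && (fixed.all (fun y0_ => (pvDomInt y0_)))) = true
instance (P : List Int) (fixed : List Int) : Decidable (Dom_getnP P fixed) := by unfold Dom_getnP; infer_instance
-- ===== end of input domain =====

-- B replaces A's Fenwick tree by a plain list of seen values with a direct "count smaller" scan (simpler, same results; not faster).


-- ===== PORT A =====
-- Python update(bit, i, v): while i < len(bit): bit[i] += v; i += i & (-i).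
-- The extra '0 < i & (-i)' guard only makes the recursion total (for i = 0 Python loops forever; never reached from getnP).
def pvUpdate (bit : List Int) (i : Int) (v : Int) : List Int :=
  if h : i < (bit.length : Int) ∧ 0 < PySem.Int.band i (-i) then
    pvUpdate (bit.set i.toNat (bit.getD i.toNat 0 + v)) (i + PySem.Int.band i (-i)) v
  else bit
termination_by ((bit.length : Int) - i).toNat
decreasing_by simp only [List.length_set]; omega

-- Python getsum(bit, i): s = 0; while i > 0: s += bit[i]; i -= i & (-i); return s  (s is the accumulator).
-- The extra '0 < i & (-i)' guard only makes the recursion total (it always holds when 0 < i).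
def pvGetsum (bit : List Int) (i : Int) (s : Int) : Int :=
  if h : 0 < i ∧ 0 < PySem.Int.band i (-i) then
    pvGetsum bit (i - PySem.Int.band i (-i)) (s + bit.getD i.toNat 0)
  else s
termination_by i.toNat
decreasing_by omega

def getnP (P : List Int) (fixed : List Int) : List Int :=
  let n : Int := P.length
  let m : Int := (PySem.List.max? P (fun y => y)).getD 0   -- max(P); none (= ValueError on empty P) is excluded by Pre_
  let nI : List Int := (PySem.List.pyRange 2 (n+1) 1).foldl
      (fun nI i => nI ++ [PySem.List.pyGetD nI (-1) 0 + PySem.List.pyGetD fixed (i-2) 0]) [0]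
  let bit : List Int := List.replicate (m+1).toNat 0
  let nP : List Int := List.replicate n.toNat 0
  let res := (PySem.List.pyRange (n-1) 0 (-1)).foldl
      (fun st i =>
        if PySem.List.pyGetD P i 0 > 0 then
          (pvUpdate st.1 (PySem.List.pyGetD P i 0) 1,
           PySem.List.pySetD st.2 i
             (PySem.List.pyGetD nI (PySem.List.pyGetD P i 0 - 1) 0
               - pvGetsum st.1 (PySem.List.pyGetD P i 0 - 1) 0))
        else (st.1, PySem.List.pySetD st.2 i (-1)))
      (bit, nP)
  res.2

-- ===== PORT B =====
def getnP_alt (P : List Int) (fixed : List Int) : List Int :=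
  let n : Int := P.length
  let nI : List Int := (PySem.List.pyRange 2 (n+1) 1).foldl
      (fun nI i => nI ++ [PySem.List.pyGetD nI (-1) 0 + PySem.List.pyGetD fixed (i-2) 0]) [0]
  let res := (PySem.List.pyRange (n-1) 0 (-1)).foldl
      (fun st i =>
        if PySem.List.pyGetD P i 0 > 0 then
          (st.1 ++ [PySem.List.pyGetD P i 0],
           PySem.List.pySetD st.2 i
             (PySem.List.pyGetD nI (PySem.List.pyGetD P i 0 - 1) 0
               - (st.1.countP (fun v => decide (v < PySem.List.pyGetD P i 0)) : Int)))
        else (st.1, PySem.List.pySetD st.2 i (-1)))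
      (([] : List Int), List.replicate n.toNat 0)
  res.2

-- ===== PRECONDITION & SPEC =====
-- Pre_ excludes exactly the inputs where Python A raises: empty P (ValueError in max), fixed shorter than
-- len(P)-1 (IndexError in the nI loop), or an element > len(P) at a position ≥ 1 (IndexError in nI[P[i]-1]).
-- P[0] is never used as an index (the loop stops at 1), so no condition on it: A returns there and B matches.
def Pre_getnP (P : List Int) (fixed : List Int) : Prop :=
  P ≠ [] ∧ (P.length : Int) - 1 ≤ (fixed.length : Int) ∧ ∀ x ∈ P.tail, x ≤ (P.length : Int)
instance (P : List Int) (fixed : List Int) : Decidable (Pre_getnP P fixed) := by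
  unfold Pre_getnP; infer_instance
def pvWitness_getnP : List Int × List Int := ([5, 1, 2], [1, 1])

def Spec_getnP (P : List Int) (fixed : List Int) (out : List Int) : Prop := out = getnP_alt P fixed
instance (P : List Int) (fixed : List Int) (out : List Int) : Decidable (Spec_getnP P fixed out) := by unfold Spec_getnP; infer_instance

-- ===== CLAIM (what is proved, stated in full; the proofs are below) =====
def Claim_equal_getnP : Prop := ∀ (P : List Int) (fixed : List Int), Dom_getnP P fixed → Pre_getnP P fixed → Spec_getnP P fixed (getnP P fixed)

-- ===== LEMMAS AND PROOFS =====

-- the lowest set bit of a positive number, as Python's i & (-i) computes it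
def pvLow (n : Nat) : Nat := n - (n &&& (n - 1))

theorem pvBand_neg_self (i : Int) (h : 0 < i) :
    PySem.Int.band i (-i) = (pvLow i.toNat : Nat) := by
  unfold PySem.Int.band
  have h1 : 0 ≤ i := le_of_lt h
  have h2 : ¬ 0 ≤ -i := by omega
  rw [if_pos h1, if_neg h2]
  have : (-(-i) - 1).toNat = i.toNat - 1 := by omega
  rw [this]
  rfl

theorem pvAnd_two_mul_add_one (a b : Nat) : (2*a+1) &&& 2*b = 2*(a &&& b) := by
  apply Nat.eq_of_testBit_eq
  intro i
  rw [Nat.testBit_and]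
  cases i with
  | zero => simp [Nat.testBit_zero, Nat.mul_mod_right]
  | succ j => rw [Nat.testBit_succ, Nat.testBit_succ, Nat.testBit_succ,
      (by omega : (2*a+1)/2 = a), Nat.mul_div_cancel_left _ (by norm_num : 0 < 2),
      Nat.mul_div_cancel_left _ (by norm_num : 0 < 2), Nat.testBit_and]

theorem pvLow_odd (n : Nat) (h : n % 2 = 1) : pvLow n = 1 := by
  obtain ⟨c, rfl⟩ : ∃ c, n = 2*c+1 := ⟨n/2, by omega⟩
  unfold pvLow
  have h1 : 2*c+1-1 = 2*c := by omega
  rw [h1, pvAnd_two_mul_add_one, Nat.and_self]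
  omega

theorem pvLow_even (k : Nat) : pvLow (2 * k) = 2 * pvLow k := by
  rcases Nat.eq_zero_or_pos k with hk | hk
  · simp [hk, pvLow]
  unfold pvLow
  have h1 : 2*k - 1 = 2*(k-1)+1 := by omega
  rw [h1, Nat.and_comm, pvAnd_two_mul_add_one, Nat.and_comm (k-1) k]
  have h2 : k &&& (k-1) ≤ k := Nat.and_le_left
  omega

theorem pvLow_bounds (n : Nat) (h : 0 < n) : 1 ≤ pvLow n ∧ pvLow n ≤ n := by
  induction n using Nat.strong_induction_on with
  | _ n ih =>
    rcases Nat.mod_two_eq_zero_or_one n with he | ho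
    · obtain ⟨k, rfl⟩ : ∃ k, n = 2*k := ⟨n/2, by omega⟩
      have hk : 0 < k := by omega
      have := ih k (by omega) hk
      rw [pvLow_even]
      omega
    · have := pvLow_odd n ho
      omega

theorem pvLow_add (n : Nat) (h : 0 < n) : 2 * pvLow n ≤ pvLow (n + pvLow n) := by
  induction n using Nat.strong_induction_on with
  | _ n ih =>
    rcases Nat.mod_two_eq_zero_or_one n with he | ho
    · obtain ⟨k, rfl⟩ : ∃ k, n = 2*k := ⟨n/2, by omega⟩
      have hk : 0 < k := by omega
      have h1 := ih k (by omega) hk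
      rw [pvLow_even, (by ring : 2*k + 2*pvLow k = 2*(k + pvLow k)), pvLow_even]
      omega
    · rw [pvLow_odd n ho]
      obtain ⟨k, rfl⟩ : ∃ k, n = 2*k+1 := ⟨n/2, by omega⟩
      have h1 : 2*k+1+1 = 2*(k+1) := by ring
      rw [h1, pvLow_even]
      have := pvLow_bounds (k+1) (by omega)
      omega

theorem pvLow_step (i j : Nat) (hi : 0 < i) (hij : i < j) (h : j - pvLow j < i) :
    i + pvLow i ≤ j := by
  induction j using Nat.strong_induction_on generalizing i with
  | _ j ih =>
    rcases Nat.mod_two_eq_zero_or_one j with he | ho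
    · obtain ⟨m, rfl⟩ : ∃ m, j = 2*m := ⟨j/2, by omega⟩
      have hm : 0 < m := by omega
      have hlm := pvLow_bounds m hm
      rw [pvLow_even] at h
      rcases Nat.mod_two_eq_zero_or_one i with hie | hio
      · obtain ⟨k, rfl⟩ : ∃ k, i = 2*k := ⟨i/2, by omega⟩
        have hk : 0 < k := by omega
        have h1 : k + pvLow k ≤ m := by
          apply ih m (by omega) k hk (by omega) (by omega)
        rw [pvLow_even]
        omega
      · rw [pvLow_odd i hio]
        omega
    · rw [pvLow_odd j ho] at h
      omega

theorem pvLow_nest (i j : Nat) (hi : 0 < i) (hij : i ≤ j) (h : j - pvLow j < i) :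
    j - pvLow j ≤ i - pvLow i := by
  induction j using Nat.strong_induction_on generalizing i with
  | _ j ih =>
    rcases eq_or_lt_of_le hij with rfl | hlt
    · omega
    rcases Nat.mod_two_eq_zero_or_one j with he | ho
    · obtain ⟨m, rfl⟩ : ∃ m, j = 2*m := ⟨j/2, by omega⟩
      have hm : 0 < m := by omega
      have hlm := pvLow_bounds m hm
      rw [pvLow_even] at h ⊢
      rcases Nat.mod_two_eq_zero_or_one i with hie | hio
      · obtain ⟨k, rfl⟩ : ∃ k, i = 2*k := ⟨i/2, by omega⟩
        have hk : 0 < k := by omega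
        have hlk := pvLow_bounds k hk
        have h1 : m - pvLow m ≤ k - pvLow k :=
          ih m (by omega) k hk (by omega) (by omega)
        rw [pvLow_even]
        omega
      · rw [pvLow_odd i hio]
        omega
    · rw [pvLow_odd j ho] at h
      omega

-- the value a Fenwick cell j holds: how many seen values lie in (j - low j, j]
def pvCell (seen : List Int) (j : Nat) : Int :=
  (seen.countP (fun v => decide ((j : Int) - (pvLow j : Nat) < v ∧ v ≤ (j : Int))) : Nat)

-- invariant of A's bit array after inserting the values `seen` (each in (0, m])
def pvFInv (m : Int) (seen : List Int) (bit : List Int) : Prop :=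
  bit.length = (m + 1).toNat ∧ (∀ v ∈ seen, 0 < v ∧ v ≤ m) ∧
  ∀ j : Nat, 1 ≤ j → (j : Int) ≤ m → bit.getD j 0 = pvCell seen j

theorem pvCountP_split (l : List Int) (a b : Int) (h0 : 0 ≤ a) (hab : a ≤ b) :
    l.countP (fun v => decide (1 ≤ v ∧ v ≤ a)) + l.countP (fun v => decide (a < v ∧ v ≤ b))
      = l.countP (fun v => decide (1 ≤ v ∧ v ≤ b)) := by
  induction l with
  | nil => rfl
  | cons x t ih =>
    simp only [List.countP_cons, decide_eq_true_eq]
    split_ifs <;> omega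

theorem pvGetsum_eq (m : Int) (seen bit : List Int) (hInv : pvFInv m seen bit) :
    ∀ (k : Nat), (k : Int) ≤ m → ∀ s : Int,
      pvGetsum bit (k : Int) s = s + (seen.countP (fun v => decide (1 ≤ v ∧ v ≤ (k : Int))) : Nat) := by
  intro k
  induction k using Nat.strong_induction_on with
  | _ k ih =>
    intro hk s
    rcases Nat.eq_zero_or_pos k with rfl | hpos
    · rw [pvGetsum]
      rw [dif_neg (by simp)]
      have : seen.countP (fun v => decide (1 ≤ v ∧ v ≤ ((0:Nat) : Int))) = 0 :=
        List.countP_eq_zero.2 (by intro v hv; simp; omega)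
      rw [this]; simp
    · have hlow := pvLow_bounds k hpos
      have hband : PySem.Int.band (k : Int) (-(k : Int)) = (pvLow k : Nat) := by
        have := pvBand_neg_self (k : Int) (by exact_mod_cast hpos)
        simpa using this
      rw [pvGetsum, dif_pos (by
        refine ⟨by exact_mod_cast hpos, ?_⟩
        rw [hband]; exact_mod_cast hlow.1)]
      rw [hband]
      have hsub : (k : Int) - ((pvLow k : Nat) : Int) = ((k - pvLow k : Nat) : Int) := by omega
      rw [hsub]
      rw [ih (k - pvLow k) (by omega) (by omega)]
      have hcell : bit.getD ((k:Int)).toNat 0 = pvCell seen k := by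
        have := hInv.2.2 k hpos hk
        simpa using this
      rw [hcell]
      have hsplit := pvCountP_split seen ((k - pvLow k : Nat) : Int) (k : Int) (by omega) (by omega)
      unfold pvCell
      have hc : (seen.countP (fun v => decide ((k : Int) - (pvLow k : Nat) < v ∧ v ≤ (k : Int))) : Int)
          = (seen.countP (fun v => decide (((k - pvLow k : Nat) : Int) < v ∧ v ≤ (k : Int))) : Int) := by
        rw [hsub]
      rw [hc]
      omega

theorem pvUpdate_length (bit : List Int) (i v : Int) : (pvUpdate bit i v).length = bit.length := by
  fun_induction pvUpdate with
  | case1 bit i h ih => rw [ih]; simp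
  | case2 => rfl

theorem pvUpdate_getD_aux (fuel : Nat) : ∀ (bit : List Int) (i : Int), ((bit.length : Int) - i).toNat = fuel →
    1 ≤ i → ∀ j : Nat,
    (pvUpdate bit i 1).getD j 0 =
      bit.getD j 0 + (if i ≤ (j : Int) ∧ j < bit.length ∧ (j : Int) - (pvLow j : Nat) < i then 1 else 0) := by
  induction fuel using Nat.strong_induction_on with
  | _ fuel ih =>
    intro bit i hfuel hi j
    have hni : i = ((i.toNat : Nat) : Int) := by omega
    have hni1 : 1 ≤ i.toNat := by omega
    have hband : PySem.Int.band i (-i) = (pvLow i.toNat : Nat) := pvBand_neg_self i (by omega)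
    have hlow := pvLow_bounds i.toNat hni1
    by_cases hg : i < (bit.length : Int)
    · rw [pvUpdate, dif_pos ⟨hg, by rw [hband]; exact_mod_cast hlow.1⟩]
      set bit' := bit.set i.toNat (bit.getD i.toNat 0 + 1) with hbit'
      have hlen' : bit'.length = bit.length := by simp [hbit']
      have hrec := ih (((bit'.length : Int) - (i + PySem.Int.band i (-i))).toNat)
        (by rw [hlen', hband]; omega)
        bit' (i + PySem.Int.band i (-i)) rfl (by rw [hband]; omega) j
      rw [hrec, hband, hlen']
      have hset : bit'.getD j 0 = if j = i.toNat then bit.getD j 0 + 1 else bit.getD j 0 := by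
        rw [hbit', List.getD_eq_getElem?_getD, List.getD_eq_getElem?_getD, List.getElem?_set]
        by_cases hje : j = i.toNat
        · simp [hje, (by omega : i.toNat < bit.length)]
        · simp [Ne.symm hje, hje]
      rw [hset]
      have hlj : 1 ≤ j → 1 ≤ pvLow j ∧ pvLow j ≤ j := fun h => pvLow_bounds j h
      have hl0 : pvLow 0 = 0 := rfl
      have hstep : i.toNat < j → j - pvLow j < i.toNat → i.toNat + pvLow i.toNat ≤ j :=
        fun a b => pvLow_step i.toNat j hni1 a b
      have hnest : i.toNat + pvLow i.toNat ≤ j → j - pvLow j < i.toNat + pvLow i.toNat →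
          j - pvLow j ≤ i.toNat + pvLow i.toNat - pvLow (i.toNat + pvLow i.toNat) :=
        fun a b => pvLow_nest (i.toNat + pvLow i.toNat) j (by omega) a b
      have hadd : 2 * pvLow i.toNat ≤ pvLow (i.toNat + pvLow i.toNat) := pvLow_add i.toNat hni1
      split_ifs <;> omega
    · rw [pvUpdate, dif_neg (by intro hc; exact hg hc.1)]
      rw [if_neg (by intro hc; omega)]
      omega

theorem pvUpdate_getD (bit : List Int) (i : Int) (hi : 1 ≤ i) (j : Nat) :
    (pvUpdate bit i 1).getD j 0 =
      bit.getD j 0 + (if i ≤ (j : Int) ∧ j < bit.length ∧ (j : Int) - (pvLow j : Nat) < i then 1 else 0) :=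
  pvUpdate_getD_aux _ bit i rfl hi j

theorem pvUpdate_inv (m v : Int) (seen bit : List Int) (hInv : pvFInv m seen bit)
    (hv0 : 0 < v) (hvm : v ≤ m) : pvFInv m (seen ++ [v]) (pvUpdate bit v 1) := by
  obtain ⟨hlen, hmem, hcell⟩ := hInv
  refine ⟨by rw [pvUpdate_length, hlen], ?_, ?_⟩
  · intro w hw
    rcases List.mem_append.1 hw with h | h
    · exact hmem w h
    · simp at h; subst h; exact ⟨hv0, hvm⟩
  · intro j hj1 hjm
    have hjlen : j < bit.length := by omega
    rw [pvUpdate_getD bit v (by omega) j, hcell j hj1 hjm]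
    unfold pvCell
    rw [List.countP_append]
    have hlowj := pvLow_bounds j hj1
    simp only [List.countP_cons, List.countP_nil, decide_eq_true_eq]
    split_ifs <;> push_cast <;> omega

theorem pvLoop_eq (P nI : List Int) (m : Int) (hmax : ∀ x ∈ P, x ≤ m) :
    ∀ (ids : List Int) (bit seen nP : List Int),
      (∀ i ∈ ids, 1 ≤ i ∧ i < (P.length : Int)) → pvFInv m seen bit →
      (ids.foldl
        (fun st i =>
          if PySem.List.pyGetD P i 0 > 0 then
            (pvUpdate st.1 (PySem.List.pyGetD P i 0) 1,
             PySem.List.pySetD st.2 i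
               (PySem.List.pyGetD nI (PySem.List.pyGetD P i 0 - 1) 0
                 - pvGetsum st.1 (PySem.List.pyGetD P i 0 - 1) 0))
          else (st.1, PySem.List.pySetD st.2 i (-1)))
        (bit, nP)).2
      = (ids.foldl
        (fun st i =>
          if PySem.List.pyGetD P i 0 > 0 then
            (st.1 ++ [PySem.List.pyGetD P i 0],
             PySem.List.pySetD st.2 i
               (PySem.List.pyGetD nI (PySem.List.pyGetD P i 0 - 1) 0
                 - (st.1.countP (fun v => decide (v < PySem.List.pyGetD P i 0)) : Int)))
          else (st.1, PySem.List.pySetD st.2 i (-1)))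
        (seen, nP)).2 := by
  intro ids
  induction ids with
  | nil => intro bit seen nP _ _; rfl
  | cons i rest ih =>
    intro bit seen nP hids hInv
    obtain ⟨hi1, hilt⟩ := hids i (List.mem_cons_self ..)
    simp only [List.foldl_cons]
    by_cases hpi : PySem.List.pyGetD P i 0 > 0
    · rw [if_pos hpi, if_pos hpi]
      set pi := PySem.List.pyGetD P i 0 with hpidef
      have hmem : pi ∈ P := PySem.List.pyGetD_mem P 0 ⟨by omega, by omega⟩
      have hpim : pi ≤ m := hmax pi hmem
      have hk : pi - 1 = (((pi - 1).toNat : Nat) : Int) := by omega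
      have hgs : pvGetsum bit (pi - 1) 0 = (seen.countP (fun v => decide (v < pi)) : Int) := by
        rw [hk, pvGetsum_eq m seen bit ⟨hInv.1, hInv.2.1, hInv.2.2⟩ (pi-1).toNat (by omega) 0]
        have : seen.countP (fun v => decide (1 ≤ v ∧ v ≤ (((pi - 1).toNat : Nat) : Int)))
            = seen.countP (fun v => decide (v < pi)) := by
          apply List.countP_congr
          intro x hx
          have := hInv.2.1 x hx
          simp only [decide_eq_true_eq]
          omega
        rw [this]
        omega
      rw [hgs]
      exact ih (pvUpdate bit pi 1) (seen ++ [pi]) _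
        (fun x hx => hids x (List.mem_cons_of_mem _ hx))
        (pvUpdate_inv m pi seen bit hInv (by omega) hpim)
    · rw [if_neg hpi, if_neg hpi]
      exact ih bit seen _ (fun x hx => hids x (List.mem_cons_of_mem _ hx)) hInv

theorem pvFInv_init (m : Int) : pvFInv m [] (List.replicate (m+1).toNat 0) := by
  refine ⟨by simp, by simp, ?_⟩
  intro j hj1 hjm
  rw [List.getD_eq_getElem?_getD, List.getElem?_replicate]
  unfold pvCell
  by_cases h : j < (m+1).toNat <;> simp [h]

-- ===== VERDICT (by name: the statement is the Claim_ definition above) =====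
theorem getnP_spec : Claim_equal_getnP := by
  intro P fixed _ _
  unfold Spec_getnP getnP getnP_alt
  have hmax : ∀ x ∈ P, x ≤ (PySem.List.max? P (fun y => y)).getD 0 := by
    intro x hx
    rcases hmaxe : PySem.List.max? P (fun y => y) with _ | m0
    · have : x ∈ ([] : List Int) := (PySem.List.max?_eq_none_iff P (fun y => y)).1 hmaxe ▸ hx
      simp at this
    · simpa using PySem.List.max?_isMax hmaxe x hx
  exact pvLoop_eq P _ _ hmax _ _ _ _
    (fun i hi => by have := PySem.List.mem_pyRange_neg_one.1 hi; omega)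
    (pvFInv_init _)
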